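-- pv_equiv track=rewrite | github.com/filipe-costa/dsa-exercises | exercises/week_1.py | largestSalaries
-- ===== SOURCE A (Python) =====
-- def largestSalaries(Salaries, Genders):
--     largestMaleSalary = 0
--     largestFemaleSalary = 0
--
--     for i in range(0, len(Salaries)):
--         if Genders[i] == 'F':
--             if Salaries[i] > largestFemaleSalary:
--                 largestFemaleSalary = Salaries[i]
--         else:
--             if Salaries[i] > largestMaleSalary:
--                 largestMaleSalary = Salaries[i]
--
--     return [largestFemaleSalary, largestMaleSalary]
-- ===== SOURCE B (Python) =====
-- def largestSalaries(Salaries, Genders):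
--     females = [s for s, g in zip(Salaries, Genders) if g == 'F']
--     males = [s for s, g in zip(Salaries, Genders) if g != 'F']
--     return [max([0] + females), max([0] + males)]
-- ===== Notes on version B (the rewrite author's own statement) =====
-- stated objective: simpler
-- what changed: Replaces the interleaved index loop maintaining two running maxima with a partition of (salary, gender) pairs by gender into two lists, each reduced with max([0]+list).
import Mathlib
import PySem

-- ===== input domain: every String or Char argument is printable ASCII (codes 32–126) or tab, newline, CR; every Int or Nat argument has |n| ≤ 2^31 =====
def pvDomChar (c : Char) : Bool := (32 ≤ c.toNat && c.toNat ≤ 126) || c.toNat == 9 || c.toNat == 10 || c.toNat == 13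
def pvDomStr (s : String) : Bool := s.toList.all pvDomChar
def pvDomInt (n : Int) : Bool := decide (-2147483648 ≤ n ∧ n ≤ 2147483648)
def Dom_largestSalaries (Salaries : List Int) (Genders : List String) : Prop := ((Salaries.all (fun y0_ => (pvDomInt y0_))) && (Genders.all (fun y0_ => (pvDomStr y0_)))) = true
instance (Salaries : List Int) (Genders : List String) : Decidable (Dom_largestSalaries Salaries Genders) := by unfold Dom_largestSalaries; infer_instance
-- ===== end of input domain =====

-- B partitions the zipped (salary, gender) pairs by gender and reduces each part with max,
-- instead of A's index loop updating two running maxima; objective: simpler.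

-- ===== PORT A =====
-- one loop step of A: read Genders[i] and Salaries[i] (none = IndexError, excluded by Pre_)
def stepA (Salaries : List Int) (Genders : List String) (st : Int × Int) (i : Int) : Int × Int :=
  match PySem.List.pyGet? Genders i, PySem.List.pyGet? Salaries i with
  | some g, some s =>
      if g = "F" then (st.1, if s > st.2 then s else st.2)
      else ((if s > st.1 then s else st.1), st.2)
  | _, _ => st   -- IndexError: unreachable under Pre_

def largestSalaries (Salaries : List Int) (Genders : List String) : List Int :=
  let res := (PySem.List.pyRange 0 Salaries.length 1).foldl (stepA Salaries Genders) (0, 0)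
  [res.2, res.1]

-- ===== PORT B =====
def largestSalaries_alt (Salaries : List Int) (Genders : List String) : List Int :=
  let pairs := Salaries.zip Genders
  let females := (pairs.filter (fun p => p.2 == "F")).map Prod.fst
  let males := (pairs.filter (fun p => p.2 != "F")).map Prod.fst
  [females.foldl max 0, males.foldl max 0]

-- ===== PRECONDITION & SPEC =====
-- Pre_ excludes exactly the inputs where A raises IndexError (Genders shorter than Salaries).
def Pre_largestSalaries (Salaries : List Int) (Genders : List String) : Prop :=
  Salaries.length ≤ Genders.length
instance (Salaries : List Int) (Genders : List String) : Decidable (Pre_largestSalaries Salaries Genders) := by unfold Pre_largestSalaries; infer_instance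
def pvWitness_largestSalaries : List Int × List String := ([3, -1, 7], ["F", "M", "F"])


def Spec_largestSalaries (Salaries : List Int) (Genders : List String) (out : List Int) : Prop := out = largestSalaries_alt Salaries Genders
instance (Salaries : List Int) (Genders : List String) (out : List Int) : Decidable (Spec_largestSalaries Salaries Genders out) := by unfold Spec_largestSalaries; infer_instance

-- ===== CLAIM (what is proved, stated in full; the proofs are below) =====
def Claim_equal_largestSalaries : Prop := ∀ (Salaries : List Int) (Genders : List String), Dom_largestSalaries Salaries Genders → Pre_largestSalaries Salaries Genders → Spec_largestSalaries Salaries Genders (largestSalaries Salaries Genders)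

-- ===== LEMMAS AND PROOFS =====

-- the zip-level step corresponding to A's loop body
def stepZ (st : Int × Int) (p : Int × String) : Int × Int :=
  if p.2 = "F" then (st.1, if p.1 > st.2 then p.1 else st.2)
  else ((if p.1 > st.1 then p.1 else st.1), st.2)

theorem foldA_eq_foldZ : ∀ (S : List Int) (G : List String), S.length ≤ G.length →
    ∀ mf : Int × Int,
    (PySem.List.pyRange 0 S.length 1).foldl (stepA S G) mf = (S.zip G).foldl stepZ mf := by
  intro S
  induction S with
  | nil =>
      intro G _ mf
      simp [PySem.List.pyRange_one_eq_nil]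
  | cons s S' ih =>
      intro G hlen mf
      cases G with
      | nil => simp at hlen
      | cons g G' =>
          have hn : (0:Int) < (((s :: S').length : Nat) : Int) := by simp
          rw [PySem.List.pyRange_one_cons hn]
          simp only [List.foldl_cons, List.zip_cons_cons]
          have h0 : stepA (s :: S') (g :: G') mf 0 = stepZ mf (s, g) := by
            simp [stepA, stepZ]
          rw [h0]
          have hlen' : S'.length ≤ G'.length := by simpa using hlen
          rw [← ih G' hlen' (stepZ mf (s, g))]
          have hlist : PySem.List.pyRange (0 + 1) (((s :: S').length : Nat) : Int) 1
              = (PySem.List.pyRange 0 ((S'.length : Nat) : Int) 1).map (fun i => i + 1) := by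
            rw [PySem.List.pyRange_one, PySem.List.pyRange_one, List.map_map]
            have hcast : ((((s :: S').length : Nat) : Int) - (0 + 1)).toNat
                = (((S'.length : Nat) : Int) - 0).toNat := by simp
            rw [hcast]
            congr 1
            funext k
            simp [Function.comp]
            omega
          rw [hlist, List.foldl_map]
          apply PySem.List.foldl_congr_mem
          intro st i hi
          have h0i : 0 ≤ i := ((PySem.List.mem_pyRange_one).1 hi).1
          obtain ⟨k, rfl⟩ := Int.eq_ofNat_of_zero_le h0i
          simp [stepA, PySem.List.pyGet?_cons_succ]

theorem foldZ_eq_maxes : ∀ (ps : List (Int × String)) (m f : Int),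
    ps.foldl stepZ (m, f)
      = (((ps.filter (fun p => p.2 != "F")).map Prod.fst).foldl max m,
         ((ps.filter (fun p => p.2 == "F")).map Prod.fst).foldl max f) := by
  intro ps
  induction ps with
  | nil => intro m f; simp
  | cons p ps ih =>
      intro m f
      by_cases hp : p.2 = "F" <;>
        simp [stepZ, hp, ih, max_def] <;>
        congr 1 <;> split <;> omega

-- ===== VERDICT (by name: the statement is the Claim_ definition above) =====
theorem largestSalaries_spec : Claim_equal_largestSalaries := by
  intro S G _ hpre
  show largestSalaries S G = largestSalaries_alt S G
  unfold largestSalaries largestSalaries_alt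
  rw [foldA_eq_foldZ S G hpre, foldZ_eq_maxes]
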